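-- pv_equiv track=rewrite | github.com/HardNightCode/infortisa_vendor_catalog_import | models/_ecom_public_category_patch.py | _smart_split_ecom_path
-- ===== SOURCE A (Python) =====
-- def _smart_split_ecom_path(text):
--     """
--     Divide solo en separadores de ruta ' / ' o ' > ' cuando NO están dentro de paréntesis.
--     Si el texto no tiene esos separadores, se devuelve como un único nodo.
--     """
--     s = str(text or '')
--     parts, buf, depth = [], [], 0
--     i, n = 0, len(s)
--     while i < n:
--         ch = s[i]
--         if ch == '(':
--             depth += 1
--         elif ch == ')' and depth > 0:
--             depth -= 1
--         # separador ' / ' (con espacios) fuera de paréntesis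
--         if depth == 0 and i+2 < n and s[i] == ' ' and s[i+1] == '/' and s[i+2] == ' ':
--             seg = ''.join(buf).strip()
--             if seg: parts.append(seg)
--             buf = []; i += 3; continue
--         # separador ' > ' fuera de paréntesis
--         if depth == 0 and ch == '>' and i > 0 and s[i-1] == ' ' and (i+1 == n or s[i+1] == ' '):
--             seg = ''.join(buf).strip()
--             if seg: parts.append(seg)
--             buf = []; i += 1; continue
--         buf.append(ch); i += 1
--     last = ''.join(buf).strip()
--     if last: parts.append(last)
--     return parts or [s.strip()]
-- ===== SOURCE B (Python) =====
-- def _smart_split_ecom_path(text):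
--     s = str(text or '')
--     n = len(s)
--     # pass 1: record split boundaries (segment_end, next_start) outside parentheses
--     bounds = []
--     depth = 0
--     i = 0
--     while i < n:
--         ch = s[i]
--         if ch == '(':
--             depth += 1
--         elif ch == ')' and depth > 0:
--             depth -= 1
--         if depth == 0 and i + 2 < n and ch == ' ' and s[i+1] == '/' and s[i+2] == ' ':
--             bounds.append((i, i + 3))
--             i += 3
--         elif depth == 0 and ch == '>' and i > 0 and s[i-1] == ' ' and (i + 1 == n or s[i+1] == ' '):
--             bounds.append((i, i + 1))
--             i += 1
--         else:
--             i += 1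
--     # pass 2: slice between consecutive boundaries
--     parts = []
--     start = 0
--     for end, nxt in bounds:
--         seg = s[start:end].strip()
--         if seg:
--             parts.append(seg)
--         start = nxt
--     last = s[start:].strip()
--     if last:
--         parts.append(last)
--     return parts or [s.strip()]
-- ===== Notes on version B (the rewrite author's own statement) =====
-- stated objective: alternative
-- what changed: B replaces A's character-buffer accumulation with a two-pass decomposition: one pass records only the (segment_end, next_start) boundary pairs outside parentheses, and a second, list-shaped pass slices the string between consecutive boundaries, strips and filters the slices.
import Mathlib
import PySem

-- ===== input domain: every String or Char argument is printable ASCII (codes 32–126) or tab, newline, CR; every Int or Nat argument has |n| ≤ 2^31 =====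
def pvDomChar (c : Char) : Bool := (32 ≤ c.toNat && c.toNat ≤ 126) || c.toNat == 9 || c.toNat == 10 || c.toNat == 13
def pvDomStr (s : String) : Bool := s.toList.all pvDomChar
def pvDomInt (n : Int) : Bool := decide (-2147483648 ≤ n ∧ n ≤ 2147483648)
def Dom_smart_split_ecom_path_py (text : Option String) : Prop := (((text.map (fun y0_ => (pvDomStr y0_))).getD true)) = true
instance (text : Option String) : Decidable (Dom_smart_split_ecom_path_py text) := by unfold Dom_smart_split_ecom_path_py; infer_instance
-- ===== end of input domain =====

-- B records split boundaries in one pass and slices the string in a second pass,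
-- instead of accumulating a character buffer; objective: alternative decomposition.

-- shared primitive lines of both Pythons (depth update; the two separator tests;
-- "seg = ….strip(); if seg: parts.append(seg)")
def pvStep (depth : Int) (ch : Char) : Int :=
  if ch = '(' then depth + 1 else if ch = ')' ∧ 0 < depth then depth - 1 else depth

def pvSepSlash (s : List Char) (n i : Nat) (d : Int) : Bool :=
  d == 0 && decide (i + 2 < n) && s.getD i ' ' == ' ' && s.getD (i+1) ' ' == '/' && s.getD (i+2) ' ' == ' '

def pvSepGt (s : List Char) (n i : Nat) (d : Int) : Bool :=
  d == 0 && s.getD i ' ' == '>' && decide (0 < i) && s.getD (i-1) ' ' == ' ' && (decide (i+1 = n) || s.getD (i+1) ' ' == ' ')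

def pvPushSeg (parts : List String) (seg : List Char) : List String :=
  if PySem.Chars.strip seg = [] then parts else parts ++ [String.ofList (PySem.Chars.strip seg)]

-- ===== PORT A =====
-- A's while loop: carries the character buffer `buf` and flushes it at each separator.
def aLoop (s : List Char) (n i : Nat) (depth : Int) (buf : List Char) (parts : List String) : List String :=
  if _h : i < n then
    if pvSepSlash s n i (pvStep depth (s.getD i ' ')) then
      aLoop s n (i+3) (pvStep depth (s.getD i ' ')) [] (pvPushSeg parts buf)
    else if pvSepGt s n i (pvStep depth (s.getD i ' ')) then
      aLoop s n (i+1) (pvStep depth (s.getD i ' ')) [] (pvPushSeg parts buf)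
    else
      aLoop s n (i+1) (pvStep depth (s.getD i ' ')) (buf ++ [s.getD i ' ']) parts
  else pvPushSeg parts buf
termination_by n - i
decreasing_by all_goals omega

def smart_split_ecom_path_py (text : Option String) : List String :=
  let s := text.getD ""          -- str(text or '')
  let cs := s.toList
  let parts := aLoop cs cs.length 0 0 [] []
  if parts = [] then [String.ofList (PySem.Chars.strip cs)] else parts

-- ===== PORT B =====
-- B pass 1: only the boundary pairs (segment_end, next_start); no buffer.
def bBounds (s : List Char) (n i : Nat) (depth : Int) (bounds : List (Nat × Nat)) : List (Nat × Nat) :=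
  if _h : i < n then
    if pvSepSlash s n i (pvStep depth (s.getD i ' ')) then
      bBounds s n (i+3) (pvStep depth (s.getD i ' ')) (bounds ++ [(i, i+3)])
    else if pvSepGt s n i (pvStep depth (s.getD i ' ')) then
      bBounds s n (i+1) (pvStep depth (s.getD i ' ')) (bounds ++ [(i, i+1)])
    else
      bBounds s n (i+1) (pvStep depth (s.getD i ' ')) bounds
  else bounds
termination_by n - i
decreasing_by all_goals omega

-- B pass 2: slice s between consecutive boundaries (s[start:end] = PySem slice).
def bSlices (s : List Char) (start : Nat) (bounds : List (Nat × Nat)) (parts : List String) : List String :=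
  match bounds with
  | [] => pvPushSeg parts (PySem.List.slice s (some (start : Int)) none)
  | (e, nx) :: bs => bSlices s nx bs (pvPushSeg parts (PySem.List.slice s (some (start : Int)) (some (e : Int))))

def smart_split_ecom_path_py_alt (text : Option String) : List String :=
  let s := text.getD ""          -- str(text or '')
  let cs := s.toList
  let parts := bSlices cs 0 (bBounds cs cs.length 0 0 []) []
  if parts = [] then [String.ofList (PySem.Chars.strip cs)] else parts

-- ===== PRECONDITION & SPEC =====
def Spec_smart_split_ecom_path_py (text : Option String) (out : List String) : Prop := out = smart_split_ecom_path_py_alt text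
instance (text : Option String) (out : List String) : Decidable (Spec_smart_split_ecom_path_py text out) := by unfold Spec_smart_split_ecom_path_py; infer_instance

-- ===== CLAIM (what is proved, stated in full; the proofs are below) =====
def Claim_equal_smart_split_ecom_path_py : Prop := ∀ (text : Option String), Dom_smart_split_ecom_path_py text → Spec_smart_split_ecom_path_py text (smart_split_ecom_path_py text)

-- ===== LEMMAS AND PROOFS =====

-- proof-only helper: B's second pass with a pending prefix `buf` in front of the current slice
def gSlices (s buf : List Char) (start : Nat) (bounds : List (Nat × Nat)) (parts : List String) : List String :=
  match bounds with
  | [] => pvPushSeg parts (buf ++ s.drop start)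
  | (e, nx) :: bs => gSlices s [] nx bs (pvPushSeg parts (buf ++ (s.drop start).take (e - start)))

lemma bBounds_acc (s : List Char) (n : Nat) :
    ∀ m i depth acc, m = n - i →
      bBounds s n i depth acc = acc ++ bBounds s n i depth [] := by
  intro m
  induction m using Nat.strong_induction_on with
  | _ m ih =>
    intro i depth acc hm
    rw [bBounds]
    conv_rhs => rw [bBounds]
    split_ifs with h h1 h2
    · rw [ih (n - (i+3)) (by omega) (i+3) _ _ rfl,
          ih (n - (i+3)) (by omega) (i+3) _ ([] ++ [(i, i+3)]) rfl]
      simp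
    · rw [ih (n - (i+1)) (by omega) (i+1) _ _ rfl,
          ih (n - (i+1)) (by omega) (i+1) _ ([] ++ [(i, i+1)]) rfl]
      simp
    · exact ih (n - (i+1)) (by omega) (i+1) _ _ rfl
    · simp

lemma bBounds_head_ge (s : List Char) (n : Nat) :
    ∀ m i depth e nx bs, m = n - i →
      bBounds s n i depth [] = (e, nx) :: bs → i ≤ e := by
  intro m
  induction m using Nat.strong_induction_on with
  | _ m ih =>
    intro i depth e nx bs hm hb
    rw [bBounds] at hb
    split_ifs at hb with h h1 h2
    · rw [bBounds_acc s n (n - (i+3)) (i+3) _ _ rfl] at hb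
      simp only [List.nil_append, List.singleton_append, List.cons.injEq, Prod.mk.injEq] at hb
      omega
    · rw [bBounds_acc s n (n - (i+1)) (i+1) _ _ rfl] at hb
      simp only [List.nil_append, List.singleton_append, List.cons.injEq, Prod.mk.injEq] at hb
      omega
    · have := ih (n - (i+1)) (by omega) (i+1) _ e nx bs rfl hb
      omega

lemma gSlices_shift (s : List Char) (i : Nat) (hi : i < s.length) (buf : List Char)
    (parts : List String) (B : List (Nat × Nat))
    (hB : ∀ e nx bs, B = (e, nx) :: bs → i + 1 ≤ e) :
    gSlices s buf i B parts = gSlices s (buf ++ [s[i]]) (i+1) B parts := by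
  cases B with
  | nil =>
    simp only [gSlices]
    rw [List.drop_eq_getElem_cons hi]
    simp
  | cons hd bs =>
    obtain ⟨e, nx⟩ := hd
    have he : i + 1 ≤ e := hB e nx bs rfl
    simp only [gSlices]
    congr 2
    rw [List.drop_eq_getElem_cons hi]
    have h1 : e - i = (e - (i+1)) + 1 := by omega
    rw [h1, List.take_succ_cons]
    simp

lemma main_loop (s : List Char) (n : Nat) (hn : n = s.length) :
    ∀ m i depth buf parts, m = n - i →
      aLoop s n i depth buf parts = gSlices s buf i (bBounds s n i depth []) parts := by
  intro m
  induction m using Nat.strong_induction_on with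
  | _ m ih =>
    intro i depth buf parts hm
    rw [aLoop]
    conv_rhs => rw [bBounds]
    split_ifs with h h1 h2
    · -- ' / ' separator
      rw [bBounds_acc s n (n - (i+3)) (i+3) _ _ rfl]
      rw [ih (n - (i+3)) (by omega) (i+3) _ _ _ rfl]
      conv_rhs => rw [gSlices.eq_def]
      simp
    · -- ' > ' separator
      rw [bBounds_acc s n (n - (i+1)) (i+1) _ _ rfl]
      rw [ih (n - (i+1)) (by omega) (i+1) _ _ _ rfl]
      conv_rhs => rw [gSlices.eq_def]
      simp
    · -- ordinary character
      rw [ih (n - (i+1)) (by omega) (i+1) _ _ _ rfl]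
      have hi : i < s.length := by omega
      have hch : s.getD i ' ' = s[i] := List.getD_eq_getElem s ' ' hi
      rw [hch]
      exact (gSlices_shift s i hi buf parts _
        (fun e nx bs hb => bBounds_head_ge s n (n - (i+1)) (i+1) _ e nx bs rfl hb)).symm
    · -- i ≥ n : buffer flush, empty bounds
      simp only [gSlices]
      rw [List.drop_eq_nil_of_le (by omega)]
      simp

lemma gSlices_nil_buf (s : List Char) :
    ∀ bounds start parts, gSlices s [] start bounds parts = bSlices s start bounds parts := by
  intro bounds
  induction bounds with
  | nil =>
    intro start parts
    simp [gSlices, bSlices, PySem.List.slice_from_natCast]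
  | cons hd bs ih =>
    intro start parts
    obtain ⟨e, nx⟩ := hd
    simp only [gSlices, bSlices, List.nil_append]
    rw [ih, PySem.List.slice_natCast]

-- ===== VERDICT (by name: the statement is the Claim_ definition above) =====
theorem smart_split_ecom_path_py_spec : Claim_equal_smart_split_ecom_path_py := by
  intro text _
  unfold Spec_smart_split_ecom_path_py smart_split_ecom_path_py smart_split_ecom_path_py_alt
  dsimp only
  rw [main_loop _ _ rfl ((text.getD "").toList.length - 0) 0 0 [] [] rfl, gSlices_nil_buf]
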